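-- pv_equiv track=rewrite | github.com/enzohe36/ref_database | merge_refs.py | _collapse_single_uppers
-- ===== SOURCE A (Python) =====
-- def _collapse_single_uppers(tokens):
--     """Collapse consecutive single-uppercase tokens into one word.
--     E.g. ['U', 'S', 'A'] -> ['USA'], ['Proc', 'Natl', 'Acad', 'Sci', 'U', 'S', 'A'] -> ['Proc', 'Natl', 'Acad', 'Sci', 'USA']
--     """
--     result = []
--     i = 0
--     while i < len(tokens):
--         if len(tokens[i]) == 1 and tokens[i].isupper():
--             # Collect consecutive single uppercase letters
--             run = tokens[i]
--             j = i + 1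
--             while j < len(tokens) and len(tokens[j]) == 1 and tokens[j].isupper():
--                 run += tokens[j]
--                 j += 1
--             result.append(run)
--             i = j
--         else:
--             result.append(tokens[i])
--             i += 1
--     return result
-- ===== SOURCE B (Python) =====
-- def _collapse_single_uppers(tokens):
--     """Collapse consecutive single-uppercase tokens into one word.
--
--     One-pass accumulator: grow a pending run of single uppercase letters,
--     flush it whenever a non-matching token (or the end) is reached.
--     """
--     result = []
--     run = ''
--     for t in tokens:
--         if len(t) == 1 and t.isupper():
--             run += t
--         else:
--             if run:
--                 result.append(run)
--                 run = ''
--             result.append(t)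
--     if run:
--         result.append(run)
--     return result
-- ===== Notes on version B (the rewrite author's own statement) =====
-- stated objective: simpler
-- what changed: Replaces A's index-based outer while with a nested two-pointer inner while by a single pass over the tokens carrying a pending-run accumulator flushed at each non-matching token and at the end.
import Mathlib
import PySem

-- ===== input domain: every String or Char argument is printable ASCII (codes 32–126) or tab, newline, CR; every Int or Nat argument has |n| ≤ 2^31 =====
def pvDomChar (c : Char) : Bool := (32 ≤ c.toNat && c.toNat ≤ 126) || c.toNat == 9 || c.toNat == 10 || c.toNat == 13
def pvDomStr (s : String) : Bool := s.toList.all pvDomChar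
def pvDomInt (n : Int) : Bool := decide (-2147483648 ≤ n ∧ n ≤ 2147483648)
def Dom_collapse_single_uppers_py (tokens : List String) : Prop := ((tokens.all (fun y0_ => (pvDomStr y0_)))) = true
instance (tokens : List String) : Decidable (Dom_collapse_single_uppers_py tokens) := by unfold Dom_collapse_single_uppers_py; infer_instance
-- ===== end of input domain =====

-- B replaces A's index-based two-pointer run collection by a single pass with a pending-run accumulator (simpler; same O(n) cost).


-- ===== PORT A =====
-- s.isupper(): at least one cased character and no lowercase one — exact on the ASCII domain, where cased = alphabetic
def pvStrIsupper (s : String) : Bool :=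
  s.toList.any PySem.Chars.isalpha && s.toList.all (fun c => !PySem.Chars.islower c)

-- the test `len(t) == 1 and t.isupper()` both Pythons perform
def pvSingleUpper (t : String) : Bool := PySem.Str.len t == 1 && pvStrIsupper t

-- inner while: collect the run starting at j, return (run, j) at exit
def pvAInner (tokens : List String) (run : String) (j : Nat) : String × Nat :=
  if h : j < tokens.length then
    if pvSingleUpper tokens[j] then pvAInner tokens (run ++ tokens[j]) (j + 1)
    else (run, j)
  else (run, j)
termination_by tokens.length - j

-- the inner while leaves j no smaller than it was (needed for the outer loop's termination)
theorem pvAInner_le (tokens : List String) (run : String) (j : Nat) :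
    j ≤ (pvAInner tokens run j).2 := by
  fun_induction pvAInner tokens run j with
  | case1 run j h hp ih => omega
  | case2 run j h hp => simp
  | case3 run j h => simp

-- outer while of A
def pvAOuter (tokens : List String) (i : Nat) (result : List String) : List String :=
  if h : i < tokens.length then
    if pvSingleUpper tokens[i] then
      pvAOuter tokens (pvAInner tokens tokens[i] (i + 1)).2
        (result ++ [(pvAInner tokens tokens[i] (i + 1)).1])
    else
      pvAOuter tokens (i + 1) (result ++ [tokens[i]])
  else result
termination_by tokens.length - i
decreasing_by
  · have := pvAInner_le tokens tokens[i] (i + 1); omega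
  · omega

def collapse_single_uppers_py (tokens : List String) : List String :=
  pvAOuter tokens 0 []

-- ===== PORT B =====
-- one fold step of B's for-loop; state = (result, pending run)
def pvBStep (st : List String × String) (t : String) : List String × String :=
  if pvSingleUpper t then (st.1, st.2 ++ t)
  else if st.2 = "" then (st.1 ++ [t], "")
  else (st.1 ++ [st.2, t], "")

def collapse_single_uppers_py_alt (tokens : List String) : List String :=
  let st := tokens.foldl pvBStep ([], "")
  if st.2 = "" then st.1 else st.1 ++ [st.2]

-- ===== PRECONDITION & SPEC =====
def Spec_collapse_single_uppers_py (tokens : List String) (out : List String) : Prop := out = collapse_single_uppers_py_alt tokens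
instance (tokens : List String) (out : List String) : Decidable (Spec_collapse_single_uppers_py tokens out) := by unfold Spec_collapse_single_uppers_py; infer_instance

-- ===== CLAIM (what is proved, stated in full; the proofs are below) =====
def Claim_equal_collapse_single_uppers_py : Prop := ∀ (tokens : List String), Dom_collapse_single_uppers_py tokens → Spec_collapse_single_uppers_py tokens (collapse_single_uppers_py tokens)

-- ===== LEMMAS AND PROOFS =====

-- common reference shape: the collapsed token list, by structural recursion on the remaining suffix
def pvJoin : List String → String
  | [] => ""
  | t :: l => t ++ pvJoin l

def pvSpecList : List String → List String
  | [] => []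
  | t :: rest =>
    if pvSingleUpper t then
      (t ++ pvJoin (rest.takeWhile pvSingleUpper)) :: pvSpecList (rest.dropWhile pvSingleUpper)
    else
      t :: pvSpecList rest
termination_by l => l.length
decreasing_by
  · have := List.length_dropWhile_le pvSingleUpper rest; simp; omega
  · simp

theorem drop_length_takeWhile {α : Type} (p : α → Bool) (l : List α) :
    l.drop (l.takeWhile p).length = l.dropWhile p := by
  induction l with
  | nil => rfl
  | cons a l ih =>
    by_cases h : p a
    · simpa [h] using ih
    · simp [h]

theorem pvDropAdd {α : Type} (l : List α) (m n : Nat) : l.drop (m + n) = (l.drop m).drop n := by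
  rw [List.drop_drop, Nat.add_comm]

theorem pvBStep_pos (st : List String × String) (t : String) (h : pvSingleUpper t = true) :
    pvBStep st t = (st.1, st.2 ++ t) := by simp [pvBStep, h]

theorem pvBStep_neg_empty (st : List String × String) (t : String)
    (h : ¬ pvSingleUpper t = true) (h2 : st.2 = "") : pvBStep st t = (st.1 ++ [t], "") := by
  simp [pvBStep, h, h2]

theorem pvBStep_neg_run (st : List String × String) (t : String)
    (h : ¬ pvSingleUpper t = true) (h2 : st.2 ≠ "") : pvBStep st t = (st.1 ++ [st.2, t], "") := by
  simp [pvBStep, h, h2]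

theorem pvSpecList_cons_pos {t : String} {rest : List String} (h : pvSingleUpper t = true) :
    pvSpecList (t :: rest) =
      (t ++ pvJoin (rest.takeWhile pvSingleUpper)) :: pvSpecList (rest.dropWhile pvSingleUpper) := by
  rw [pvSpecList]; simp [h]

theorem pvSpecList_cons_neg {t : String} {rest : List String} (h : ¬ pvSingleUpper t = true) :
    pvSpecList (t :: rest) = t :: pvSpecList rest := by
  rw [pvSpecList]; simp [h]

theorem pvAInner_spec (tokens : List String) (run : String) (j : Nat) :
    pvAInner tokens run j =
      (run ++ pvJoin ((tokens.drop j).takeWhile pvSingleUpper),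
       j + ((tokens.drop j).takeWhile pvSingleUpper).length) := by
  fun_induction pvAInner tokens run j with
  | case1 run j h hp ih =>
    rw [ih, List.drop_eq_getElem_cons h]
    simp only [List.takeWhile_cons, hp, if_true, Prod.mk.injEq]
    refine ⟨by simp [pvJoin, String.append_assoc], by simp; omega⟩
  | case2 run j h hp =>
    have hd : (tokens.drop j).takeWhile pvSingleUpper = [] := by
      rw [List.drop_eq_getElem_cons h]; simp [hp]
    simp [hd, pvJoin]
  | case3 run j h =>
    have : tokens.drop j = [] := List.drop_eq_nil_of_le (by omega)
    simp [this, pvJoin]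

theorem pvAOuter_spec (tokens : List String) (i : Nat) (result : List String) :
    pvAOuter tokens i result = result ++ pvSpecList (tokens.drop i) := by
  fun_induction pvAOuter tokens i result with
  | case1 i result h hp ih =>
    have hk : tokens.drop (i + 1 + ((tokens.drop (i + 1)).takeWhile pvSingleUpper).length)
        = (tokens.drop (i + 1)).dropWhile pvSingleUpper := by
      rw [pvDropAdd tokens (i + 1), drop_length_takeWhile]
    rw [ih, pvAInner_spec]
    dsimp only
    rw [hk, List.drop_eq_getElem_cons h, pvSpecList_cons_pos hp]
    simp
  | case2 i result h hp ih =>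
    rw [ih, List.drop_eq_getElem_cons h, pvSpecList_cons_neg hp]
    simp
  | case3 i result h =>
    have : tokens.drop i = [] := List.drop_eq_nil_of_le (by omega)
    simp [this, pvSpecList]

-- a token passing the single-upper test has length 1, hence is nonempty
theorem pvSingleUpper_ne_empty {t : String} (h : pvSingleUpper t = true) : t ≠ "" := by
  intro he; subst he; simp [pvSingleUpper, PySem.Str.len] at h

theorem append_ne_empty_right {s t : String} (h : t ≠ "") : s ++ t ≠ "" := by
  intro he
  have : (s ++ t).toList = [] := by rw [he]; rfl
  simp at this
  exact h this.2

theorem pvBFold_spec (ts : List String) : ∀ (result : List String) (run : String),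
    (let st := ts.foldl pvBStep (result, run)
     if st.2 = "" then st.1 else st.1 ++ [st.2]) =
      (if run = "" then result ++ pvSpecList ts
       else result ++ (run ++ pvJoin (ts.takeWhile pvSingleUpper)) ::
              pvSpecList (ts.dropWhile pvSingleUpper)) := by
  induction ts with
  | nil =>
    intro result run
    by_cases hr : run = "" <;> simp [hr, pvSpecList, pvJoin]
  | cons t ts ih =>
    intro result run
    by_cases hp : pvSingleUpper t
    · have ht : t ≠ "" := pvSingleUpper_ne_empty hp
      by_cases hr : run = ""
      · subst hr
        rw [List.foldl_cons, pvBStep_pos _ _ hp]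
        dsimp only
        rw [show ("" : String) ++ t = t by simp]
        rw [ih result t, if_neg ht, if_pos rfl, pvSpecList_cons_pos hp]
      · have hrt : run ++ t ≠ "" := append_ne_empty_right ht
        rw [List.foldl_cons, pvBStep_pos _ _ hp]
        dsimp only
        rw [ih result (run ++ t), if_neg hrt, if_neg hr,
          List.takeWhile_cons_of_pos hp, List.dropWhile_cons_of_pos hp]
        simp [pvJoin, String.append_assoc]
    · by_cases hr : run = ""
      · subst hr
        rw [List.foldl_cons, pvBStep_neg_empty _ _ hp rfl]
        dsimp only
        rw [ih (result ++ [t]) "", if_pos rfl, if_pos rfl, pvSpecList_cons_neg hp]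
        simp
      · rw [List.foldl_cons, pvBStep_neg_run _ _ hp hr]
        dsimp only
        rw [ih (result ++ [run, t]) "", if_pos rfl, if_neg hr,
          List.takeWhile_cons_of_neg hp, List.dropWhile_cons_of_neg hp, pvSpecList_cons_neg hp]
        simp [pvJoin]

-- ===== VERDICT (by name: the statement is the Claim_ definition above) =====
theorem collapse_single_uppers_py_spec : Claim_equal_collapse_single_uppers_py := by
  intro tokens _
  unfold Spec_collapse_single_uppers_py collapse_single_uppers_py collapse_single_uppers_py_alt
  rw [pvAOuter_spec]
  have h := pvBFold_spec tokens [] ""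
  rw [if_pos rfl] at h
  simpa using h.symm
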